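-- pv_equiv track=rewrite | github.com/BigGoodness/Phase-Gate | Python/Gate-four/level-5/getting_prime_numbers.py | sort_prime_numbers
-- ===== SOURCE A (Python) =====
-- def sort_prime_numbers(number):
--     numbers = []
--
--     for numbs in number:
--         if numbs <= 1:
--             continue
--
--         count = 0
--         for digit in range(2, numbs):
--             if numbs % digit == 0:
--                 count += 1
--
--         if count == 0:
--             numbers.append(numbs)
--
--     numbers.sort()
--     return numbers
-- ===== SOURCE B (Python) =====
-- def sort_prime_numbers(number):
--     if not number:
--         return []
--     m = max(number)
--     if m < 2:
--         is_prime = []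
--     else:
--         is_prime = [True] * (m + 1)
--         is_prime[0] = False
--         is_prime[1] = False
--         for p in range(2, m + 1):
--             for q in range(2, m // p + 1):
--                 is_prime[q * p] = False
--     return sorted(n for n in number if n > 1 and is_prime[n])
-- ===== Notes on version B (the rewrite author's own statement) =====
-- stated objective: faster
-- what changed: Replaces A's per-element trial division over the full range(2, n) (plus append-then-sort) by building one boolean multiples-marking sieve table over [0, max(number)] and doing a single filter pass over the list before sorting.
import Mathlib
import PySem

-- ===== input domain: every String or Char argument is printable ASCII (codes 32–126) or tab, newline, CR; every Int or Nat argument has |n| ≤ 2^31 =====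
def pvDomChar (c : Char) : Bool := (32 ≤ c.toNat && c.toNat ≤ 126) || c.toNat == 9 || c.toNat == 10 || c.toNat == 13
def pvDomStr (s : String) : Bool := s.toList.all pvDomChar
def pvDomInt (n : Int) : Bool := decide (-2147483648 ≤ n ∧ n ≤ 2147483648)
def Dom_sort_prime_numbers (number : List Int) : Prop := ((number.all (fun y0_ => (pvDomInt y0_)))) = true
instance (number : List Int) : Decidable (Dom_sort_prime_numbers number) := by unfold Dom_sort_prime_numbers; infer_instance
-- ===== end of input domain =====

-- B replaces A's per-element full trial-division scan by one multiples-marking sieve table over [0, max] plus a single filter pass (objective: faster).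


-- ===== PORT A =====
def sort_prime_numbers (number : List Int) : List Int :=
  let numbers : List Int := number.foldl (fun numbers numbs =>
    if numbs ≤ 1 then numbers
    else
      let count : Int := (PySem.List.pyRange 2 numbs 1).foldl
        (fun count digit => if PySem.Int.mod numbs digit = 0 then count + 1 else count) 0
      if count = 0 then numbers ++ [numbs] else numbers) []
  PySem.List.sorted numbers (fun x => x) false

-- ===== PORT B =====
-- Source B's is_prime list is ported as Array Bool. Every assignment is_prime[q*p] = False and
-- every lookup is_prime[n] in Source B has a nonnegative in-range index (2 ≤ p, 2 ≤ q, q*p ≤ m,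
-- resp. 1 < n ≤ m), so setIfInBounds (q*p).toNat / getD n.toNat is exact Python semantics here.
def sort_prime_numbers_alt (number : List Int) : List Int :=
  if number = [] then []
  else
    let m : Int := (PySem.List.max? number (fun x => x)).getD 0
    let isPrime : Array Bool :=
      if m < 2 then #[]
      else
        let t0 := ((Array.replicate (m + 1).toNat true).setIfInBounds 0 false).setIfInBounds 1 false
        (PySem.List.pyRange 2 (m + 1) 1).foldl (fun t p =>
          (PySem.List.pyRange 2 (PySem.Int.floordiv m p + 1) 1).foldl
            (fun s q => s.setIfInBounds (q * p).toNat false) t) t0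
    PySem.List.sorted
      (number.filter (fun n => decide (1 < n) && isPrime.getD n.toNat false))
      (fun x => x) false

-- ===== PRECONDITION & SPEC =====
def Spec_sort_prime_numbers (number : List Int) (out : List Int) : Prop := out = sort_prime_numbers_alt number
instance (number : List Int) (out : List Int) : Decidable (Spec_sort_prime_numbers number out) := by unfold Spec_sort_prime_numbers; infer_instance

-- ===== CLAIM (what is proved, stated in full; the proofs are below) =====
def Claim_equal_sort_prime_numbers : Prop := ∀ (number : List Int), Dom_sort_prime_numbers number → Spec_sort_prime_numbers number (sort_prime_numbers number)

-- ===== LEMMAS AND PROOFS =====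

-- A's divisor test: some d in [2, n) divides n
def hasDiv (n : Int) : Bool := (PySem.List.pyRange 2 n 1).any (fun d => PySem.Int.mod n d = 0)

-- the inner count is zero iff no divisor exists in the range
lemma count_eq_zero_iff (n : Int) :
    ((PySem.List.pyRange 2 n 1).foldl
      (fun count digit => if PySem.Int.mod n digit = 0 then count + 1 else count) (0 : Int) = 0)
    ↔ hasDiv n = false := by
  rw [show (fun (count digit : Int) => if PySem.Int.mod n digit = 0 then count + 1 else count)
      = (fun (acc : Int) (x : Int) => if (fun d => decide (PySem.Int.mod n d = 0)) x = true then acc + 1 else acc) by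
    funext c d; simp]
  rw [PySem.List.foldl_count_if]
  simp [hasDiv, List.any_eq_false, List.countP_eq_zero]

-- A's accumulator loop is a filter
lemma foldA_eq_filter (l : List Int) (acc : List Int) :
    l.foldl (fun numbers numbs =>
      if numbs ≤ 1 then numbers
      else
        let count : Int := (PySem.List.pyRange 2 numbs 1).foldl
          (fun count digit => if PySem.Int.mod numbs digit = 0 then count + 1 else count) 0
        if count = 0 then numbers ++ [numbs] else numbers) acc
    = acc ++ l.filter (fun n => decide (1 < n) && !hasDiv n) := by
  induction l generalizing acc with
  | nil => simp
  | cons x xs ih =>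
    simp only [List.foldl_cons, List.filter_cons]
    by_cases h1 : x ≤ 1
    · rw [if_pos h1, ih]
      have hp : (decide (1 < x) && !hasDiv x) = false := by
        have : decide (1 < x) = false := by simp; omega
        simp [this]
      simp [hp]
    · rw [if_neg h1]
      by_cases h2 : (PySem.List.pyRange 2 x 1).foldl
          (fun count digit => if PySem.Int.mod x digit = 0 then count + 1 else count) (0 : Int) = 0
      · have hd : hasDiv x = false := (count_eq_zero_iff x).mp h2
        rw [if_pos h2, ih]
        have hp : (decide (1 < x) && !hasDiv x) = true := by simp [hd]; omega
        simp [hp]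
      · have hd : hasDiv x = true := by
          cases hdd : hasDiv x with
          | true => rfl
          | false => exact absurd ((count_eq_zero_iff x).mpr hdd) h2
        rw [if_neg h2, ih]
        simp [hd]

-- one marking pass: the final cell equals the old cell unless some written index hits it
lemma getD_foldl_setIfInBounds (qs : List Int) (f : Int → Int) (t : Array Bool) (i : Nat) :
    (qs.foldl (fun s q => s.setIfInBounds (f q).toNat false) t).getD i false
    = (t.getD i false && !(qs.any (fun q => (f q).toNat == i))) := by
  induction qs generalizing t with
  | nil => simp
  | cons q qs ih =>
    simp only [List.foldl_cons, List.any_cons]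
    rw [ih]
    have hset : (t.setIfInBounds (f q).toNat false).getD i false
        = (t.getD i false && !((f q).toNat == i)) := by
      simp only [Array.getD_eq_getD_getElem?, Array.getElem?_setIfInBounds]
      by_cases he : (f q).toNat = i
      · simp only [he]
        by_cases hi : i < t.size <;> simp [hi]
      · simp [he]
    rw [hset]
    cases t.getD i false <;> cases ((f q).toNat == i) <;> simp

-- the whole double marking loop
lemma getD_sieve (m : Int) (ps : List Int) (t : Array Bool) (i : Nat) :
    (ps.foldl (fun t p =>
        (PySem.List.pyRange 2 (PySem.Int.floordiv m p + 1) 1).foldl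
          (fun s q => s.setIfInBounds (q * p).toNat false) t) t).getD i false
    = (t.getD i false &&
        ps.all (fun p => !(PySem.List.pyRange 2 (PySem.Int.floordiv m p + 1) 1).any
          (fun q => (q * p).toNat == i))) := by
  induction ps generalizing t with
  | nil => simp
  | cons p ps ih =>
    simp only [List.foldl_cons, List.all_cons]
    rw [ih]
    rw [getD_foldl_setIfInBounds]
    cases t.getD i false <;> simp

-- divisor in [2, n) iff factorisation q*p with both factors ≥ 2 and q ≤ m // p (for 2 ≤ n ≤ m)
lemma hasDiv_iff_marked (n m : Int) (h2 : 2 ≤ n) (hm : n ≤ m) :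
    hasDiv n = true ↔
    ∃ p, 2 ≤ p ∧ p ≤ m ∧ ∃ q, 2 ≤ q ∧ q ≤ PySem.Int.floordiv m p ∧ q * p = n := by
  constructor
  · intro h
    simp only [hasDiv, List.any_eq_true, PySem.List.mem_pyRange_one, decide_eq_true_eq] at h
    obtain ⟨d, ⟨hd2, hdn⟩, hmod⟩ := h
    rw [PySem.Int.mod_eq_zero_iff_dvd] at hmod
    obtain ⟨q, hq⟩ := hmod
    have hq2 : 2 ≤ q := by nlinarith
    have hcomm : q * d = d * q := mul_comm q d
    refine ⟨d, hd2, by omega, q, hq2, ?_, by omega⟩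
    rw [PySem.Int.le_floordiv_iff_mul_le (by omega)]
    omega
  · rintro ⟨p, hp2, hpm, q, hq2, hqf, hqn⟩
    simp only [hasDiv, List.any_eq_true, PySem.List.mem_pyRange_one, decide_eq_true_eq]
    have hcomm : q * p = p * q := mul_comm q p
    refine ⟨p, ⟨hp2, by nlinarith⟩, ?_⟩
    rw [PySem.Int.mod_eq_zero_iff_dvd]
    exact ⟨q, by omega⟩

-- B's filter test agrees with A's (for elements of the list)
lemma predB_eq (number : List Int) (hne : number ≠ []) (n : Int) (hn : n ∈ number) :
    (decide (1 < n) &&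
      (if ((PySem.List.max? number (fun x => x)).getD 0) < 2 then #[]
       else
        let m := (PySem.List.max? number (fun x => x)).getD 0
        let t0 := ((Array.replicate (m + 1).toNat true).setIfInBounds 0 false).setIfInBounds 1 false
        (PySem.List.pyRange 2 (m + 1) 1).foldl (fun t p =>
          (PySem.List.pyRange 2 (PySem.Int.floordiv m p + 1) 1).foldl
            (fun s q => s.setIfInBounds (q * p).toNat false) t) t0).getD n.toNat false)
    = (decide (1 < n) && !hasDiv n) := by
  by_cases h1 : 1 < n
  · have hd1 : decide (1 < n) = true := by simp [h1]
    cases hmax : PySem.List.max? number (fun x => x) with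
    | none => exact absurd ((PySem.List.max?_eq_none_iff number _).mp hmax) hne
    | some m0 =>
      have hnm : n ≤ m0 := PySem.List.max?_isMax hmax n hn
      simp only [Option.getD_some]
      rw [if_neg (by omega)]
      rw [getD_sieve m0]
      have ht0 : (((Array.replicate (m0 + 1).toNat true).setIfInBounds 0 false).setIfInBounds 1 false).getD n.toNat false = true := by
        simp only [Array.getD_eq_getD_getElem?, Array.getElem?_setIfInBounds, Array.getElem?_replicate]
        have e1 : ¬ (1 = n.toNat) := by omega
        have e0 : ¬ (0 = n.toNat) := by omega
        have : n.toNat < (m0 + 1).toNat := by omega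
        simp [e1, e0, this]
      rw [ht0]
      simp only [hd1, Bool.true_and]
      by_cases hdv : hasDiv n = true
      · obtain ⟨p, hp2, hpm, q, hq2, hqf, hqn⟩ := (hasDiv_iff_marked n m0 (by omega) hnm).mp hdv
        have : (PySem.List.pyRange 2 (m0 + 1) 1).all (fun p =>
            !(PySem.List.pyRange 2 (PySem.Int.floordiv m0 p + 1) 1).any fun q => (q * p).toNat == n.toNat) = false := by
          simp only [List.all_eq_false]
          refine ⟨p, PySem.List.mem_pyRange_one.mpr ⟨hp2, by omega⟩, ?_⟩
          have hany : ((PySem.List.pyRange 2 (PySem.Int.floordiv m0 p + 1) 1).any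
              fun q => (q * p).toNat == n.toNat) = true := by
            simp only [List.any_eq_true]
            refine ⟨q, PySem.List.mem_pyRange_one.mpr ⟨hq2, by omega⟩, ?_⟩
            simp [hqn]
          simp [hany]
        simp [this, hdv]
      · have hdv' : hasDiv n = false := by simpa using hdv
        have : (PySem.List.pyRange 2 (m0 + 1) 1).all (fun p =>
            !(PySem.List.pyRange 2 (PySem.Int.floordiv m0 p + 1) 1).any fun q => (q * p).toNat == n.toNat) = true := by
          simp only [List.all_eq_true]
          intro p hp
          simp only [Bool.not_eq_eq_eq_not, Bool.not_true, List.any_eq_false]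
          intro q hq
          have hp2 := PySem.List.mem_pyRange_one.mp hp
          have hq2' := PySem.List.mem_pyRange_one.mp hq
          have hqf : q ≤ PySem.Int.floordiv m0 p := by omega
          rw [PySem.Int.le_floordiv_iff_mul_le (by omega)] at hqf
          intro htn
          rw [beq_iff_eq] at htn
          have hqp0 : (0:Int) ≤ q * p := mul_nonneg (by omega) (by omega)
          have hqpn : q * p = n := by omega
          have : hasDiv n = true := (hasDiv_iff_marked n m0 (by omega) hnm).mpr
            ⟨p, by omega, by omega, q, by omega, by rw [PySem.Int.le_floordiv_iff_mul_le (by omega)]; omega, hqpn⟩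
          simp [this] at hdv'
        simp [this, hdv']
  · have hd1 : decide (1 < n) = false := by simp [h1]
    simp [hd1]

theorem main_eq (number : List Int) :
    sort_prime_numbers number = sort_prime_numbers_alt number := by
  by_cases hne : number = []
  · subst hne; rfl
  · unfold sort_prime_numbers sort_prime_numbers_alt
    rw [if_neg hne]
    rw [foldA_eq_filter]
    simp only [List.nil_append]
    congr 1
    refine List.filter_congr ?_
    intro n hn
    exact (predB_eq number hne n hn).symm

-- ===== VERDICT (by name: the statement is the Claim_ definition above) =====
theorem sort_prime_numbers_spec : Claim_equal_sort_prime_numbers := by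
  intro number _
  unfold Spec_sort_prime_numbers
  exact main_eq number
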